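-- pv_equiv track=rewrite | github.com/Marloows/Karnaugh-Map | karnaugh_map.py | kmapm
-- ===== SOURCE A (Python) =====
-- def kmapv(n = 3):
-- 	"""
--
-- 		Karnaugh-Map Vector
--
-- 		returns the first row of the karnaugh matrix
--
-- 		Used a seed to create the rest of the matrix
-- 	"""
--
-- 	if n < 1:
-- 		return [0]
--
-- 	v0 = kmapv(n-1) # recursive call to reduce the complexity of the task
--
-- 	# when the matrix has a square form
-- 	# horizontal mirroring
-- 	if n%2 == 0:
-- 		return [2*x for x in v0]
--
-- 	# odd power of 2 -> vertical mirroring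
--
-- 	m = 2**(n-1)
--
-- 	n = (n+1)//2
--
-- 	n = 2**n
--
-- 	v = list(0 for _ in range(n))
--
-- 	for i in range(n//2):
-- 		v[i] = v0[i]//2			# half of n-1 row
-- 		v[n -1 -i] = v[i] + m	# then duplicate and add 2**(n-1)
--
-- 	return v
--
-- def kmapm(n = 3):
-- 	"""
--
-- 		Karnaugh-Map Matrix
--
-- 		Generate a Karnaugh matrix filled with the decimal representation of the input ABCD...
-- 	"""
--
-- 	# I forget how figured it out :(
--
-- 	v = kmapv(n)
--
-- 	if n%2 == 0:
-- 		n = 2**(n//2)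
-- 		m = n
-- 		u = [x//2 for x in v]
-- 	else:
-- 		n = 2**((n+1)//2)
-- 		m = n//2
-- 		u = [2*x for x in v[:len(v)//2]]
--
-- 	mre = [[0 for _ in range(n)] for _ in range(m)]
--
-- 	for i in range(m):
-- 		for j in range(n):
-- 			mre[i][j] = v[j] + u[i]
--
-- 	return mre
-- ===== SOURCE B (Python) =====
-- def _spread(g):
--     """Scatter the bits of g: bit k goes to bit 2k."""
--     return 0 if g == 0 else (g & 1) + 4 * _spread(g >> 1)
--
-- def kmapm(n = 3):
--     """Karnaugh-map matrix via closed-form binary-reflected Gray codes."""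
--     qc = (n + 1) // 2                     # variables on the columns
--     cshift = 1 if n % 2 == 0 else 0       # even arity: column codes take the doubled bits
--     cols = [_spread(j ^ (j >> 1)) << cshift for j in range(1 << qc)]
--     rows = [_spread(i ^ (i >> 1)) << (1 - cshift)
--             for i in range((1 << qc) >> (1 - cshift))]   # half the columns when n is odd
--     return [[c + r for c in cols] for r in rows]
-- ===== Notes on version B (the rewrite author's own statement) =====
-- stated objective: alternative
-- what changed: Replaces the recursive even/odd mirroring construction of the Gray-code seed vector by a closed-form per-index computation (g = j ^ (j>>1), bits scattered to even positions), and builds the matrix directly by comprehension instead of filling a preallocated zero matrix with nested assignments.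
import Mathlib
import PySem

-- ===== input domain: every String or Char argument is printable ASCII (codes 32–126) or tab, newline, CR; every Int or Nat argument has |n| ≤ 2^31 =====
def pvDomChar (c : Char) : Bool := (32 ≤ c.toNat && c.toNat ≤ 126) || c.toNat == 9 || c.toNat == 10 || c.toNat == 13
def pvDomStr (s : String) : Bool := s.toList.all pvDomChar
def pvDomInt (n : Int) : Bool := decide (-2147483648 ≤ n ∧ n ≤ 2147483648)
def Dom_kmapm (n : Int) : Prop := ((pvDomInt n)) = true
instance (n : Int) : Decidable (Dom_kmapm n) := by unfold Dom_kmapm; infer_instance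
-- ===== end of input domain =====

-- B replaces A's recursive mirror construction of the Gray-code seed vector by a
-- closed-form per-cell Gray-code formula (alternative algorithm, similar cost).


-- ===== PORT A =====
-- Python's recursion on the int n terminates when n < 1; the Nat fuel n.toNat bounds
-- the recursion depth exactly, so the fuel arm `0` is only reached when n < 1 anyway.
def kmapvAux : Nat → Int → List Int
  | 0, _ => [0]
  | fuel + 1, n =>
    if n < 1 then [0]
    else
      let v0 := kmapvAux fuel (n - 1)
      if PySem.Int.mod n 2 = 0 then
        v0.map (fun x => 2 * x)
      else
        let m : Int := 2 ^ (n - 1).toNat          -- 2**(n-1); n ≥ 1 here so the exponent is exact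
        let n2 : Nat := 2 ^ (PySem.Int.floordiv (n + 1) 2).toNat   -- 2**((n+1)//2), a length
        (List.range (n2 / 2)).foldl (fun v i =>
            let v1 := v.set i (PySem.Int.floordiv (v0.getD i 0) 2)
            v1.set (n2 - 1 - i) (v1.getD i 0 + m))
          (List.replicate n2 (0 : Int))

def kmapv (n : Int) : List Int := kmapvAux n.toNat n

def kmapm (n : Int) : List (List Int) :=
  let v := kmapv n
  let p : Nat × Nat × List Int :=
    if PySem.Int.mod n 2 = 0 then
      (2 ^ (PySem.Int.floordiv n 2).toNat, 2 ^ (PySem.Int.floordiv n 2).toNat,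
       v.map (fun x => PySem.Int.floordiv x 2))
    else
      (2 ^ (PySem.Int.floordiv (n + 1) 2).toNat, 2 ^ (PySem.Int.floordiv (n + 1) 2).toNat / 2,
       (v.take (v.length / 2)).map (fun x => 2 * x))
  let nn := p.1
  let m := p.2.1
  let u := p.2.2
  (List.range m).foldl (fun M i =>
      (List.range nn).foldl (fun M j =>
        M.set i ((M.getD i []).set j (v.getD j 0 + u.getD i 0))) M)
    (List.replicate m (List.replicate nn (0 : Int)))

-- ===== PORT B =====
-- _spread's recursion halves g each step; the Nat fuel g bounds the depth exactly
-- (g >>> 1 < g for g ≠ 0), so the fuel arm `0, _+1` is never reached.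
def spreadAux : Nat → Nat → Nat
  | _, 0 => 0
  | 0, _ + 1 => 0
  | fuel + 1, g + 1 => ((g + 1) &&& 1) + 4 * spreadAux fuel ((g + 1) >>> 1)

def spreadB (g : Nat) : Nat := spreadAux g g

-- `.toNat` on the floordiv value is exact on -1 ≤ n, the whole of Pre_;
-- Python raises ValueError (1 << negative) for every n ≤ -2, outside Pre_.
def kmapm_alt (n : Int) : List (List Int) :=
  let qc := (PySem.Int.floordiv (n + 1) 2).toNat
  let cshift : Nat := if PySem.Int.mod n 2 = 0 then 1 else 0
  let cols := (List.range (1 <<< qc)).map (fun j => ((spreadB (j ^^^ (j >>> 1)) <<< cshift : Nat) : Int))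
  let rows := (List.range ((1 <<< qc) >>> (1 - cshift))).map (fun i => ((spreadB (i ^^^ (i >>> 1)) <<< (1 - cshift) : Nat) : Int))
  rows.map (fun r => cols.map (fun c => c + r))

-- ===== PRECONDITION & SPEC =====
-- Pre_ excludes exactly n ≤ -2, where Python A raises TypeError (2**negative is a float
-- handed to range); A returns normally on every n ≥ -1.
def Pre_kmapm (n : Int) : Prop := -1 ≤ n
instance (n : Int) : Decidable (Pre_kmapm n) := by unfold Pre_kmapm; infer_instance
def pvWitness_kmapm : Int := (3)

def Spec_kmapm (n : Int) (out : List (List Int)) : Prop := out = kmapm_alt n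
instance (n : Int) (out : List (List Int)) : Decidable (Spec_kmapm n out) := by unfold Spec_kmapm; infer_instance

-- ===== CLAIM (what is proved, stated in full; the proofs are below) =====
def Claim_equal_kmapm : Prop := ∀ (n : Int), Dom_kmapm n → Pre_kmapm n → Spec_kmapm n (kmapm n)

-- ===== LEMMAS AND PROOFS =====

def gray (j : Nat) : Nat := j ^^^ (j >>> 1)

-- ---- spreadB: fuel adequacy and recurrence ----

lemma spreadAux_fuel (g : Nat) : ∀ f₁ f₂ : Nat, g ≤ f₁ → g ≤ f₂ → spreadAux f₁ g = spreadAux f₂ g := by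
  induction g using Nat.strong_induction_on with
  | _ g ih =>
    intro f₁ f₂ h₁ h₂
    match g, f₁, f₂ with
    | 0, f₁, f₂ => cases f₁ <;> cases f₂ <;> rfl
    | g + 1, f₁ + 1, f₂ + 1 =>
      simp only [spreadAux]
      have hlt : (g + 1) >>> 1 < g + 1 := by
        simp [Nat.shiftRight_one]; omega
      rw [ih _ hlt f₁ f₂ (by simp [Nat.shiftRight_one] at *; omega) (by simp [Nat.shiftRight_one] at *; omega)]

lemma spreadB_zero : spreadB 0 = 0 := rfl

lemma spreadB_succ (g : Nat) (hg : g ≠ 0) : spreadB g = (g &&& 1) + 4 * spreadB (g / 2) := by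
  obtain ⟨g', rfl⟩ : ∃ g', g = g' + 1 := ⟨g - 1, by omega⟩
  show spreadAux (g' + 1) (g' + 1) = _
  simp only [spreadAux]
  rw [spreadAux_fuel ((g' + 1) >>> 1) g' ((g' + 1) / 2) (by simp [Nat.shiftRight_one]; omega) (by simp [Nat.shiftRight_one])]
  simp [Nat.shiftRight_one, spreadB]

lemma spreadB_pow_add : ∀ t a : Nat, a < 2 ^ t → spreadB (2 ^ t + a) = 4 ^ t + spreadB a := by
  intro t
  induction t with
  | zero => intro a ha; interval_cases a; decide
  | succ t ih =>
    intro a ha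
    have h1 : (2 : Nat) ^ (t + 1) = 2 * 2 ^ t := by ring
    have hne : 2 ^ (t + 1) + a ≠ 0 := by positivity
    rw [spreadB_succ _ hne, Nat.and_one_is_mod]
    have hmod : (2 ^ (t + 1) + a) % 2 = a % 2 := by omega
    have hdiv : (2 ^ (t + 1) + a) / 2 = 2 ^ t + a / 2 := by omega
    rw [hmod, hdiv, ih (a / 2) (by omega)]
    by_cases ha0 : a = 0
    · subst ha0; simp [spreadB_zero]; ring
    · rw [spreadB_succ a ha0, Nat.and_one_is_mod]; ring

-- ---- bitwise facts for the Gray reflection ----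

lemma pv_shiftRight_xor (a b : Nat) : (a ^^^ b) >>> 1 = (a >>> 1) ^^^ (b >>> 1) := by
  apply Nat.eq_of_testBit_eq; intro i
  simp [Nat.testBit_shiftRight, Nat.testBit_xor]

lemma pv_shiftRight_and (a b : Nat) : (a &&& b) >>> 1 = (a >>> 1) &&& (b >>> 1) := by
  apply Nat.eq_of_testBit_eq; intro i
  simp [Nat.testBit_shiftRight, Nat.testBit_and]

lemma pv_xor_add (a : Nat) : ∀ b : Nat, a &&& b = 0 → a ^^^ b = a + b := by
  induction a using Nat.strong_induction_on with
  | _ a ih =>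
    intro b h
    by_cases ha : a = 0
    · simp [ha]
    · have hx2 : (a ^^^ b) / 2 = a / 2 ^^^ b / 2 := by
        simpa [Nat.shiftRight_one] using pv_shiftRight_xor a b
      have hand2 : a / 2 &&& b / 2 = 0 := by
        have := pv_shiftRight_and a b
        simp [h, Nat.shiftRight_one] at this
        omega
      have hmix : a % 2 &&& b % 2 = 0 := by
        have h1 : (a &&& b) &&& 1 = 0 := by simp [h]
        have h2 : (a &&& b) &&& 1 = (a &&& 1) &&& (b &&& 1) := by
          apply Nat.eq_of_testBit_eq; intro i
          simp only [Nat.testBit_and]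
          cases a.testBit i <;> cases b.testBit i <;> cases (1 : Nat).testBit i <;> rfl
        rw [← Nat.and_one_is_mod, ← Nat.and_one_is_mod, ← h2, h1]
      have hpar : ¬(a % 2 = 1 ∧ b % 2 = 1) := by
        rintro ⟨h1, h2⟩; rw [h1, h2] at hmix; simp at hmix
      have hrec := ih (a / 2) (by omega) (b / 2) hand2
      have hm : (a ^^^ b) % 2 = (a + b) % 2 := Nat.xor_mod_two_eq
      have := hx2
      rw [hrec] at this
      omega

lemma pv_compl_xor (r j : Nat) (h : j < 2 ^ r) : (2 ^ r - 1) ^^^ j = 2 ^ r - 1 - j := by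
  have hdis : ((2 ^ r - 1) ^^^ j) &&& j = 0 := by
    apply Nat.eq_of_testBit_eq; intro i
    simp only [Nat.testBit_and, Nat.testBit_xor, Nat.testBit_two_pow_sub_one, Nat.zero_testBit]
    by_cases hi : i < r
    · cases h' : j.testBit i <;> simp [hi]
    · have : j.testBit i = false :=
        Nat.testBit_eq_false_of_lt (lt_of_lt_of_le h (Nat.pow_le_pow_right (by norm_num) (by omega)))
      simp [this]
  have hsum := pv_xor_add _ j hdis
  have hcancel : ((2 ^ r - 1) ^^^ j) ^^^ j = 2 ^ r - 1 := Nat.xor_xor_cancel_right _ _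
  have hpow : 1 ≤ 2 ^ r := Nat.one_le_two_pow
  omega

lemma pv_pow_xor (q a : Nat) (h : a < 2 ^ q) : 2 ^ q ^^^ a = 2 ^ q + a := by
  apply pv_xor_add
  apply Nat.eq_of_testBit_eq; intro i
  simp only [Nat.testBit_and, Nat.zero_testBit, Nat.testBit_two_pow]
  by_cases hi : q = i
  · subst hi
    simp [Nat.testBit_eq_false_of_lt h]
  · simp [hi]

lemma gray_lt (q j : Nat) (h : j < 2 ^ q) : gray j < 2 ^ q := by
  unfold gray
  exact Nat.xor_lt_two_pow h (lt_of_le_of_lt (by simp [Nat.shiftRight_one]; omega) h)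

lemma gray_reflect (q j : Nat) (h : j < 2 ^ q) : gray (2 ^ (q + 1) - 1 - j) = 2 ^ q + gray j := by
  have hj2 : j < 2 ^ (q + 1) := lt_of_lt_of_le h (Nat.pow_le_pow_right (by norm_num) (by omega))
  have hM : 2 ^ (q + 1) - 1 - j = (2 ^ (q + 1) - 1) ^^^ j := (pv_compl_xor (q + 1) j hj2).symm
  have hhalf : (2 ^ (q + 1) - 1) >>> 1 = 2 ^ q - 1 := by
    have : (2 : Nat) ^ (q + 1) = 2 * 2 ^ q := by ring
    simp [Nat.shiftRight_one]; omega
  have hq1 : (2 : Nat) ^ q - 1 < 2 ^ (q + 1) := by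
    have : 1 ≤ (2 : Nat) ^ q := Nat.one_le_two_pow
    have : (2 : Nat) ^ (q + 1) = 2 * 2 ^ q := by ring
    omega
  have htop : (2 ^ (q + 1) - 1) ^^^ (2 ^ q - 1) = 2 ^ q := by
    rw [pv_compl_xor (q + 1) (2 ^ q - 1) hq1]
    have h1 : 1 ≤ (2 : Nat) ^ q := Nat.one_le_two_pow
    have h2 : (2 : Nat) ^ (q + 1) = 2 * 2 ^ q := by ring
    omega
  unfold gray
  rw [hM, pv_shiftRight_xor, hhalf]
  have hreassoc : ((2 ^ (q + 1) - 1) ^^^ j) ^^^ ((2 ^ q - 1) ^^^ j >>> 1)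
      = ((2 ^ (q + 1) - 1) ^^^ (2 ^ q - 1)) ^^^ (j ^^^ j >>> 1) := by
    rw [Nat.xor_assoc, Nat.xor_assoc]
    congr 1
    rw [← Nat.xor_assoc, ← Nat.xor_assoc, Nat.xor_comm j (2 ^ q - 1)]
  rw [hreassoc, htop]
  exact pv_pow_xor q (gray j) (gray_lt q j h)

-- ---- cast helpers ----

lemma fdiv2_cast (k : Nat) : PySem.Int.floordiv (k : Int) 2 = ((k / 2 : Nat) : Int) := by
  exact_mod_cast PySem.Int.floordiv_natCast k 2

lemma mod2_cast (k : Nat) : PySem.Int.mod (k : Int) 2 = ((k % 2 : Nat) : Int) := by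
  exact_mod_cast PySem.Int.mod_natCast k 2

-- ---- loop characterisations ----

lemma mirror_fill (N : Nat) (b : Nat → Int) (m : Int) (hN : N % 2 = 0) :
    ∀ t, t ≤ N / 2 →
    (List.range t).foldl
      (fun v i => (v.set i (b i)).set (N - 1 - i) ((v.set i (b i)).getD i 0 + m))
      (List.replicate N (0 : Int))
    = (List.range N).map
        (fun j => if j < t then b j else if N - t ≤ j then b (N - 1 - j) + m else 0) := by
  intro t
  induction t with
  | zero =>
    intro _
    simp only [List.range_zero, List.foldl_nil]
    apply List.ext_getElem (by simp)
    intro j h1 h2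
    have hj : j < N := by simpa using h1
    simp only [List.getElem_replicate, List.getElem_map, List.getElem_range, Nat.sub_zero]
    rw [if_neg (by omega), if_neg (by omega)]
  | succ t ih =>
    intro ht
    rw [List.range_succ, List.foldl_append, ih (by omega), List.foldl_cons, List.foldl_nil]
    have hlen : ((List.range N).map
        (fun j => if j < t then b j else if N - t ≤ j then b (N - 1 - j) + m else 0)).length = N := by
      simp
    have hget : (((List.range N).map
        (fun j => if j < t then b j else if N - t ≤ j then b (N - 1 - j) + m else 0)).set t (b t)).getD t 0 = b t := by
      rw [List.getD_eq_getElem _ _ (by simp; omega)]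
      simp
    rw [hget]
    apply List.ext_getElem (by simp)
    intro j h1 h2
    have hj : j < N := by simpa using h2
    have ht' : t < N / 2 := by omega
    simp only [List.getElem_set, List.getElem_map, List.getElem_range]
    split_ifs <;>
      first
        | rfl
        | omega
        | (congr 1 <;> first | rfl | omega | (congr 1 <;> omega))

lemma fill_row (x : Nat → Int) (N : Nat) (r : List Int) (hr : r.length = N) :
    ∀ t, t ≤ N →
    (List.range t).foldl (fun r j => r.set j (x j)) r
    = (List.range N).map (fun j => if j < t then x j else r.getD j 0) := by
  intro t
  induction t with
  | zero =>
    intro _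
    simp only [List.range_zero, List.foldl_nil]
    apply List.ext_getElem (by simp [hr])
    intro j h1 h2
    have hj : j < N := by simpa [hr] using h1
    simp only [List.getElem_map, List.getElem_range]
    rw [if_neg (by omega), List.getD_eq_getElem _ _ (by omega)]
  | succ t ih =>
    intro ht
    rw [List.range_succ, List.foldl_append, ih (by omega), List.foldl_cons, List.foldl_nil]
    apply List.ext_getElem (by simp)
    intro j h1 h2
    have hj : j < N := by simpa using h2
    simp only [List.getElem_set, List.getElem_map, List.getElem_range]
    split_ifs <;> first | rfl | omega | (congr 1 <;> omega)

lemma inner_loop (w : Nat → Int) (i : Nat) (M : List (List Int)) (hi : i < M.length) :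
    ∀ t, (List.range t).foldl (fun M j => M.set i ((M.getD i []).set j (w j))) M
      = M.set i ((List.range t).foldl (fun r j => r.set j (w j)) (M.getD i [])) := by
  intro t
  induction t with
  | zero =>
    simp only [List.range_zero, List.foldl_nil]
    apply List.ext_getElem (by simp)
    intro j h1 h2
    simp only [List.getElem_set]
    split_ifs with hji
    · subst hji
      rw [List.getD_eq_getElem _ _ hi]
    · rfl
  | succ t ih =>
    simp only [List.range_succ, List.foldl_append, List.foldl_cons, List.foldl_nil]
    rw [ih]
    generalize (List.range t).foldl (fun r j => r.set j (w j)) (M.getD i []) = R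
    have hg : ((M.set i R).getD i []) = R := by
      rw [List.getD_eq_getElem _ _ (by simpa using hi)]
      simp
    rw [hg, List.set_set]

lemma matrix_fill (w : Nat → Nat → Int) (mr nn : Nat) :
    ∀ t, t ≤ mr →
    (List.range t).foldl
      (fun M i => (List.range nn).foldl (fun M j => M.set i ((M.getD i []).set j (w i j))) M)
      (List.replicate mr (List.replicate nn (0 : Int)))
    = (List.range mr).map
        (fun i => if i < t then (List.range nn).map (fun j => w i j) else List.replicate nn (0 : Int)) := by
  intro t
  induction t with
  | zero =>
    intro _
    simp only [List.range_zero, List.foldl_nil]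
    apply List.ext_getElem (by simp)
    intro j h1 h2
    have hj : j < mr := by simpa using h1
    simp only [List.getElem_replicate, List.getElem_map, List.getElem_range]
    rw [if_neg (by omega)]
  | succ t ih =>
    intro ht
    rw [List.range_succ, List.foldl_append, ih (by omega), List.foldl_cons, List.foldl_nil]
    rw [inner_loop (w t) t _ (by simp; omega)]
    have hgd : (((List.range mr).map
        (fun i => if i < t then (List.range nn).map (fun j => w i j) else List.replicate nn (0 : Int))).getD t []) = List.replicate nn (0 : Int) := by
      rw [List.getD_eq_getElem _ _ (by simp; omega)]
      simp
    rw [hgd, fill_row (w t) nn _ (by simp) nn le_rfl]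
    have hrow : (List.range nn).map
        (fun j => if j < nn then w t j else (List.replicate nn (0 : Int)).getD j 0)
        = (List.range nn).map (fun j => w t j) := by
      apply List.map_congr_left
      intro j hj
      simp [List.mem_range.mp hj]
    rw [hrow]
    apply List.ext_getElem (by simp)
    intro j h1 h2
    have hj : j < mr := by simpa using h1
    simp only [List.getElem_set, List.getElem_map, List.getElem_range]
    by_cases e : t = j
    · subst e
      rw [if_pos rfl, if_pos (by omega)]
    · rw [if_neg e]
      split_ifs <;> first | rfl | omega

-- ---- closed form of kmapv ----

lemma kmapv_eq_aux (k : Nat) : kmapv (k : Int) = kmapvAux k (k : Int) := by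
  simp [kmapv]

lemma kmapv_closed : ∀ k : Nat, kmapv (k : Int)
    = (List.range (2 ^ ((k + 1) / 2))).map
        (fun j => (((if k % 2 = 0 then 2 else 1) * spreadB (gray j) : Nat) : Int)) := by
  intro k
  induction k with
  | zero => decide
  | succ k ih =>
    rw [kmapv_eq_aux]
    simp only [kmapvAux]
    rw [if_neg (by push_cast; omega)]
    have hsub : ((k + 1 : Nat) : Int) - 1 = (k : Int) := by push_cast; ring
    rw [hsub, ← kmapv_eq_aux, ih]
    rw [mod2_cast (k + 1)]
    by_cases hk : (k + 1) % 2 = 0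
    · -- k+1 even: horizontal mirroring, multiply by 2
      rw [if_pos (by exact_mod_cast hk)]
      have hk' : k % 2 = 1 := by omega
      have hexp : (k + 1 + 1) / 2 = (k + 1) / 2 := by omega
      rw [List.map_map, hexp]
      apply List.map_congr_left
      intro j hj
      simp only [Function.comp_apply]
      rw [if_neg (by omega), if_pos hk]
      push_cast; ring
    · -- k+1 odd: vertical mirroring loop
      rw [if_neg (fun h => hk (by exact_mod_cast h))]
      have hk2 : k % 2 = 0 := by omega
      have hkhalf : (k + 1) / 2 = k / 2 := by omega
      have hcast2 : ((k + 1 : Nat) : Int) + 1 = ((k + 2 : Nat) : Int) := by push_cast; ring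
      rw [hkhalf, hcast2, fdiv2_cast (k + 2)]
      have hq : (k + 2) / 2 = k / 2 + 1 := by omega
      simp only [Int.toNat_natCast, hq]
      have hp : (2 : Nat) ^ (k / 2 + 1) = 2 * 2 ^ (k / 2) := by ring
      have hhalf : (2 : Nat) ^ (k / 2 + 1) / 2 = 2 ^ (k / 2) := by omega
      rw [hhalf]
      rw [mirror_fill (2 ^ (k / 2 + 1))
            (fun i => PySem.Int.floordiv
              (((List.range (2 ^ (k / 2))).map
                (fun j => (((if k % 2 = 0 then 2 else 1) * spreadB (gray j) : Nat) : Int))).getD i 0) 2)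
            (2 ^ (k : Nat)) (by omega) (2 ^ (k / 2)) (by omega)]
      apply List.map_congr_left
      intro j hj
      have hjN : j < 2 ^ (k / 2 + 1) := List.mem_range.mp hj
      have h4 : (4 : Nat) ^ (k / 2) = 2 ^ k := by
        rw [show (4 : Nat) = 2 ^ 2 from rfl, ← pow_mul]
        congr 1; omega
      by_cases hlo : j < 2 ^ (k / 2)
      · rw [if_pos hlo]
        rw [PySem.List.getD_map_range _ _ _ _ hlo]
        rw [if_pos hk2, fdiv2_cast (2 * spreadB (gray j))]
        rw [if_neg hk]
        congr 1
        omega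
      · rw [if_neg hlo, if_pos (by omega)]
        have hj' : 2 ^ (k / 2 + 1) - 1 - j < 2 ^ (k / 2) := by omega
        rw [PySem.List.getD_map_range _ _ _ _ hj']
        rw [if_pos hk2, fdiv2_cast (2 * spreadB (gray (2 ^ (k / 2 + 1) - 1 - j))), if_neg hk]
        have hrefl := gray_reflect (k / 2) (2 ^ (k / 2 + 1) - 1 - j) hj'
        rw [show 2 ^ (k / 2 + 1) - 1 - (2 ^ (k / 2 + 1) - 1 - j) = j from by omega] at hrefl
        have hspread := spreadB_pow_add (k / 2) (gray (2 ^ (k / 2 + 1) - 1 - j))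
          (gray_lt (k / 2) _ hj')
        have hpowcast : ((2 : Int)) ^ k = (((2 : Nat) ^ k : Nat) : Int) := by push_cast; rfl
        rw [hpowcast, one_mul, hrefl, hspread, h4]
        rw [show (2 * spreadB (gray (2 ^ (k / 2 + 1) - 1 - j))) / 2
            = spreadB (gray (2 ^ (k / 2 + 1) - 1 - j)) from by omega]
        push_cast
        ring

-- ---- assembling the matrix, even and odd arity ----

lemma kmapm_even (k : Nat) (hk : k % 2 = 0) : kmapm (k : Int) = kmapm_alt (k : Int) := by
  have hq : (k + 1) / 2 = k / 2 := by omega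
  have hv' : kmapv (k : Int)
      = (List.range (2 ^ (k / 2))).map (fun j => ((2 * spreadB (gray j) : Nat) : Int)) := by
    rw [kmapv_closed k, hq]
    apply List.map_congr_left
    intro j hj
    rw [if_pos hk]
  have hmod : PySem.Int.mod (k : Int) 2 = 0 := by
    rw [mod2_cast k, hk]; rfl
  have hcast1 : ((k : Int) + 1) = ((k + 1 : Nat) : Int) := by push_cast; ring
  unfold kmapm kmapm_alt
  dsimp only
  rw [hv', hcast1, fdiv2_cast k, fdiv2_cast (k + 1)]
  rw [if_pos hmod, if_pos hmod]
  simp only [Int.toNat_natCast, hq]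
  have hu : ((List.range (2 ^ (k / 2))).map (fun j => ((2 * spreadB (gray j) : Nat) : Int))).map
        (fun x => PySem.Int.floordiv x 2)
      = (List.range (2 ^ (k / 2))).map (fun j => ((spreadB (gray j) : Nat) : Int)) := by
    rw [List.map_map]
    apply List.map_congr_left
    intro j hj
    simp only [Function.comp_apply]
    rw [fdiv2_cast (2 * spreadB (gray j))]
    congr 1
    omega
  rw [hu]
  rw [matrix_fill _ (2 ^ (k / 2)) (2 ^ (k / 2)) (2 ^ (k / 2)) le_rfl]
  rw [List.map_map]
  simp only [Nat.one_shiftLeft]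
  apply List.map_congr_left
  intro i hi
  have hi' : i < 2 ^ (k / 2) := List.mem_range.mp hi
  rw [if_pos hi']
  simp only [Function.comp_apply, List.map_map]
  apply List.map_congr_left
  intro j hj
  have hj' : j < 2 ^ (k / 2) := List.mem_range.mp hj
  rw [PySem.List.getD_map_range _ _ _ _ hj', PySem.List.getD_map_range _ _ _ _ hi']
  simp only [Function.comp_apply, Nat.shiftLeft_eq, gray]
  push_cast
  ring

lemma kmapm_odd (k : Nat) (hk : k % 2 = 1) : kmapm (k : Int) = kmapm_alt (k : Int) := by
  have hq : (k + 1) / 2 = k / 2 + 1 := by omega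
  have hp : (2 : Nat) ^ (k / 2 + 1) = 2 * 2 ^ (k / 2) := by ring
  have hv' : kmapv (k : Int)
      = (List.range (2 ^ (k / 2 + 1))).map (fun j => ((spreadB (gray j) : Nat) : Int)) := by
    rw [kmapv_closed k, hq]
    apply List.map_congr_left
    intro j hj
    rw [if_neg (by omega), one_mul]
  have hmod : PySem.Int.mod (k : Int) 2 = 1 := by
    rw [mod2_cast k, hk]; rfl
  have hcast1 : ((k : Int) + 1) = ((k + 1 : Nat) : Int) := by push_cast; ring
  have hmodne : ¬(PySem.Int.mod (k : Int) 2 = 0) := by rw [hmod]; norm_num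
  unfold kmapm kmapm_alt
  dsimp only
  rw [hv', hcast1, fdiv2_cast k, fdiv2_cast (k + 1)]
  rw [if_neg hmodne, if_neg hmodne]
  simp only [Int.toNat_natCast, hq]
  have hlen : ((List.range (2 ^ (k / 2 + 1))).map
      (fun j => ((spreadB (gray j) : Nat) : Int))).length = 2 ^ (k / 2 + 1) := by simp
  have htake : ((List.range (2 ^ (k / 2 + 1))).map
        (fun j => ((spreadB (gray j) : Nat) : Int))).take
        (((List.range (2 ^ (k / 2 + 1))).map
          (fun j => ((spreadB (gray j) : Nat) : Int))).length / 2)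
      = (List.range (2 ^ (k / 2))).map (fun j => ((spreadB (gray j) : Nat) : Int)) := by
    rw [hlen, show (2 : Nat) ^ (k / 2 + 1) / 2 = 2 ^ (k / 2) from by omega,
        ← List.map_take, List.take_range, Nat.min_eq_left (by omega)]
  rw [htake]
  rw [show (2 : Nat) ^ (k / 2 + 1) / 2 = 2 ^ (k / 2) from by omega]
  rw [matrix_fill _ (2 ^ (k / 2)) (2 ^ (k / 2 + 1)) (2 ^ (k / 2)) le_rfl]
  rw [List.map_map, List.map_map]
  simp only [Nat.one_shiftLeft]
  rw [show (2 : Nat) ^ (k / 2 + 1) >>> (1 - 0) = 2 ^ (k / 2) from by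
    rw [Nat.shiftRight_one, hp]; omega]
  apply List.map_congr_left
  intro i hi
  have hi' : i < 2 ^ (k / 2) := List.mem_range.mp hi
  rw [if_pos hi']
  simp only [Function.comp_apply, List.map_map]
  apply List.map_congr_left
  intro j hj
  have hj' : j < 2 ^ (k / 2 + 1) := List.mem_range.mp hj
  rw [PySem.List.getD_map_range _ _ _ _ hj', PySem.List.getD_map_range _ _ _ _ hi']
  simp only [Function.comp_apply, Nat.shiftLeft_eq, gray]
  push_cast
  ring

-- ===== VERDICT (by name: the statement is the Claim_ definition above) =====
theorem kmapm_spec : Claim_equal_kmapm := by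
  intro n _ hpre
  unfold Spec_kmapm
  unfold Pre_kmapm at hpre
  rcases eq_or_lt_of_le hpre with h | h
  · rw [← h]; decide
  · have h0 : 0 ≤ n := by omega
    obtain ⟨k, rfl⟩ := Int.eq_ofNat_of_zero_le h0
    by_cases hk : k % 2 = 0
    · exact kmapm_even k hk
    · exact kmapm_odd k (by omega)
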